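-- pv_equiv track=rewrite | github.com/sunh423/codewars-completed | 3kyu - Battleship Field Validator/solution.py | adjacency_checker
-- ===== SOURCE A (Python) =====
-- def adjacency_checker(ardic):
--     coord = set()
--     for k in ardic:
--         for v in ardic[k]: #check for collision and illegal placements, if so, break loop
--             if v in coord:
--                 return False
--         for x,y in ardic[k]: #adding all the collision points of current ship to check with future ships.
--             coord.update({(x-1,y+1),(x,y+1),(x+1,y+1),(x-1,y),(x+1,y),(x-1,y-1),(x,y-1),(x+1,y-1)})
--     return True
-- ===== SOURCE B (Python) =====
-- def adjacency_checker(ardic):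
--     owner = {}
--     for k, cells in ardic.items():
--         for c in cells:
--             owner[c] = k
--     for k, cells in ardic.items():
--         for (x, y) in cells:
--             for dx in (-1, 0, 1):
--                 for dy in (-1, 0, 1):
--                     if dx == 0 and dy == 0:
--                         continue
--                     o = owner.get((x + dx, y + dy))
--                     if o is not None and o != k:
--                         return False
--     return True
-- ===== Notes on version B (the rewrite author's own statement) =====
-- stated objective: alternative
-- what changed: A makes one ordered pass keeping a growing set of all neighbour cells of earlier ships and checks each ship only against that set; B instead builds a cell-to-owning-ship dict in one pass and then, in a symmetric second pass, looks up the 8 neighbours of every cell and flags any neighbour owned by a different ship.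
import Mathlib
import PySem

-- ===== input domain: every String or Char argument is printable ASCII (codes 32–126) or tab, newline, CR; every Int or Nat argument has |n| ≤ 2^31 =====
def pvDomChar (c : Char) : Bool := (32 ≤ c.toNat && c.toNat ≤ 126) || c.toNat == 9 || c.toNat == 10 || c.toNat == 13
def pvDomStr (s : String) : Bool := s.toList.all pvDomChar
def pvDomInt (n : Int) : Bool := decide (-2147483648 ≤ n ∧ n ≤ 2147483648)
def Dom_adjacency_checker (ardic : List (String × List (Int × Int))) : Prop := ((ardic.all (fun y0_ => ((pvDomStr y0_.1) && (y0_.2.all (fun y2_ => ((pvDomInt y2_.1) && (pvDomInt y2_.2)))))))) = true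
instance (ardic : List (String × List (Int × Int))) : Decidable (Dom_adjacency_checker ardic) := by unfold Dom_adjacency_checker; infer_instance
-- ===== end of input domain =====

-- B replaces A's sequential "neighbour cloud" set (checking each ship only against earlier
-- ships) by a cell→owner dict built once, then a symmetric second pass that looks up the 8
-- neighbours of every cell and flags only foreign owners (objective: alternative decomposition).

-- ===== PORT A =====
-- the 8-neighbour set literal of A, in A's order
def pvNbrs (x y : Int) : List (Int × Int) :=
  [(x-1,y+1),(x,y+1),(x+1,y+1),(x-1,y),(x+1,y),(x-1,y-1),(x,y-1),(x+1,y-1)]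

-- A's 'for k in ardic' loop carrying the set 'coord' (keys are distinct under Pre_, so
-- ardic[k] is the pair's own list)
def pvLoopA : List (String × List (Int × Int)) → PySem.Set (Int × Int) → Bool
  | [], _ => true
  | (_, cells) :: rest, coord =>
    if cells.any (fun v => PySem.Set.contains coord v) then false
    else pvLoopA rest (cells.foldl (fun s c => PySem.Set.update s (pvNbrs c.1 c.2)) coord)

def adjacency_checker (ardic : List (String × List (Int × Int))) : Bool :=
  pvLoopA ardic PySem.Set.empty

-- ===== PORT B =====
-- first pass of Source B: the cell → owning-key dict
def pvOwner (ardic : List (String × List (Int × Int))) : PySem.Dict (Int × Int) String :=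
  ardic.foldl (fun d p => p.2.foldl (fun d c => d.insert c p.1) d) PySem.Dict.empty

def pvOffs : List Int := [-1, 0, 1]

def adjacency_checker_alt (ardic : List (String × List (Int × Int))) : Bool :=
  let owner := pvOwner ardic
  ardic.all (fun p =>
    p.2.all (fun c =>
      pvOffs.all (fun dx => pvOffs.all (fun dy =>
        if dx == 0 && dy == 0 then true
        else
          match owner.get? (c.1 + dx, c.2 + dy) with
          | none => true
          | some o => o == p.1))))

-- ===== PRECONDITION & SPEC =====
-- Pre_ excludes association lists with duplicate ship keys: the Python argument is a dict,
-- which cannot contain duplicate keys, so such lists do not represent any Python input.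
def Pre_adjacency_checker (ardic : List (String × List (Int × Int))) : Prop :=
  (ardic.map Prod.fst).Nodup
instance (ardic : List (String × List (Int × Int))) : Decidable (Pre_adjacency_checker ardic) := by
  unfold Pre_adjacency_checker; infer_instance

def pvWitness_adjacency_checker : (List (String × List (Int × Int))) :=
  [("a", [(0,0),(0,1)]), ("b", [(5,5)])]

def Spec_adjacency_checker (ardic : List (String × List (Int × Int))) (out : Bool) : Prop := out = adjacency_checker_alt ardic
instance (ardic : List (String × List (Int × Int))) (out : Bool) : Decidable (Spec_adjacency_checker ardic out) := by unfold Spec_adjacency_checker; infer_instance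

-- ===== CLAIM (what is proved, stated in full; the proofs are below) =====
def Claim_equal_adjacency_checker : Prop := ∀ (ardic : List (String × List (Int × Int))), Dom_adjacency_checker ardic → Pre_adjacency_checker ardic → Spec_adjacency_checker ardic (adjacency_checker ardic)

-- ===== LEMMAS AND PROOFS =====

-- two ships (in this order) are adjacent the way A detects it
def ShipAdj (p q : String × List (Int × Int)) : Prop :=
  ∃ c ∈ p.2, ∃ v ∈ q.2, v ∈ pvNbrs c.1 c.2

theorem pvNbrs_symm (c v : Int × Int) (h : v ∈ pvNbrs c.1 c.2) : c ∈ pvNbrs v.1 v.2 := by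
  rcases c with ⟨x, y⟩; rcases v with ⟨a, b⟩
  simp only [pvNbrs, List.mem_cons, List.not_mem_nil, or_false, Prod.mk.injEq] at h ⊢
  omega

theorem ShipAdj_symm {p q : String × List (Int × Int)} (h : ShipAdj p q) : ShipAdj q p := by
  obtain ⟨c, hc, v, hv, hn⟩ := h
  exact ⟨v, hv, c, hc, pvNbrs_symm c v hn⟩

theorem mem_fold_update (cells : List (Int × Int)) (coord : PySem.Set (Int × Int)) (v : Int × Int) :
    v ∈ cells.foldl (fun s c => PySem.Set.update s (pvNbrs c.1 c.2)) coord ↔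
      v ∈ coord ∨ ∃ c ∈ cells, v ∈ pvNbrs c.1 c.2 := by
  induction cells generalizing coord with
  | nil => simp
  | cons c rest ih =>
    simp only [List.foldl_cons, ih, PySem.Set.mem_update, List.mem_cons]
    constructor
    · rintro ((h | h) | ⟨d, hd, hv⟩)
      · exact Or.inl h
      · exact Or.inr ⟨c, Or.inl rfl, h⟩
      · exact Or.inr ⟨d, Or.inr hd, hv⟩
    · rintro (h | ⟨d, hd | hd, hv⟩)
      · exact Or.inl (Or.inl h)
      · exact Or.inl (Or.inr (hd ▸ hv))
      · exact Or.inr ⟨d, hd, hv⟩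

theorem pvLoopA_true_iff (l : List (String × List (Int × Int))) (coord : PySem.Set (Int × Int)) :
    pvLoopA l coord = true ↔
      (List.Pairwise (fun p q => ¬ ShipAdj p q) l ∧ ∀ p ∈ l, ∀ v ∈ p.2, v ∉ (coord : List (Int × Int))) := by
  induction l generalizing coord with
  | nil => simp [pvLoopA]
  | cons hd rest ih =>
    obtain ⟨k, cells⟩ := hd
    rw [pvLoopA]
    by_cases hany : cells.any (fun v => PySem.Set.contains coord v) = true
    · rw [if_pos hany]
      simp only [Bool.false_eq_true, false_iff, not_and]
      rintro - hno
      obtain ⟨v, hv, hvc⟩ := List.any_eq_true.mp hany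
      exact hno (k, cells) List.mem_cons_self v hv ((PySem.Set.contains_iff _ _).mp hvc)
    · rw [if_neg hany, ih]
      constructor
      · rintro ⟨hpw, hno⟩
        have hco : ∀ v ∈ cells, v ∉ (coord : List (Int × Int)) := by
          intro v hv hvc
          exact hany (List.any_eq_true.mpr ⟨v, hv, (PySem.Set.contains_iff _ _).mpr hvc⟩)
        refine ⟨List.pairwise_cons.mpr ⟨?_, hpw⟩, ?_⟩
        · intro q hq hadj
          obtain ⟨c, hc, v, hv, hn⟩ := hadj
          exact hno q hq v hv ((mem_fold_update cells coord v).mpr (Or.inr ⟨c, hc, hn⟩))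
        · intro p hp v hv
          rcases List.mem_cons.mp hp with rfl | hp
          · exact hco v hv
          · intro hvc
            exact hno p hp v hv ((mem_fold_update cells coord v).mpr (Or.inl hvc))
      · rintro ⟨hpw, hno⟩
        obtain ⟨hhd, hrest⟩ := List.pairwise_cons.mp hpw
        refine ⟨hrest, ?_⟩
        intro p hp v hv hvmem
        rcases (mem_fold_update cells coord v).mp hvmem with h | ⟨c, hc, hn⟩
        · exact hno p (List.mem_cons_of_mem _ hp) v hv h
        · exact hhd p hp ⟨c, hc, v, hv, hn⟩

theorem pvLoopA_char (l : List (String × List (Int × Int))) :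
    pvLoopA l PySem.Set.empty = true ↔ List.Pairwise (fun p q => ¬ ShipAdj p q) l := by
  rw [pvLoopA_true_iff]
  simp [PySem.Set.empty]

-- unfolding the two offset loops of Source B into a condition over the 8 neighbours
theorem offs_all_iff (f : Int × Int → Bool) (x y : Int) :
    (pvOffs.all (fun dx => pvOffs.all (fun dy =>
        if dx == 0 && dy == 0 then true else f (x + dx, y + dy))) = true) ↔
      (∀ v ∈ pvNbrs x y, f v = true) := by
  have e1 : ∀ a : Int, a + -1 = a - 1 := fun a => by ring
  have e0 : ∀ a : Int, a + 0 = a := fun a => by ring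
  simp only [pvOffs, pvNbrs, List.all_cons, List.all_nil, List.forall_mem_cons,
     Bool.and_true, Bool.and_eq_true, e1, e0]
  norm_num
  tauto

theorem offs_forall_iff (f : Int × Int → Bool) (x y : Int) :
    (∀ dx ∈ pvOffs, ∀ dy ∈ pvOffs,
        (if dx == 0 && dy == 0 then true else f (x + dx, y + dy)) = true) ↔
      (∀ v ∈ pvNbrs x y, f v = true) := by
  rw [← offs_all_iff f x y]
  simp [List.all_eq_true]

theorem match_owner_iff (t : Option String) (k : String) :
    ((match t with | none => true | some o => o == k) = true) ↔ ∀ o, t = some o → o = k := by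
  cases t <;> simp

theorem alt_true_iff (ardic : List (String × List (Int × Int))) :
    adjacency_checker_alt ardic = true ↔
      ∀ p ∈ ardic, ∀ c ∈ p.2, ∀ v ∈ pvNbrs c.1 c.2, ∀ o,
        (pvOwner ardic).get? v = some o → o = p.1 := by
  simp only [adjacency_checker_alt, List.all_eq_true]
  constructor
  · intro h p hp c hc v hv o ho
    have h3 := (offs_forall_iff
      (fun w => match (pvOwner ardic).get? w with | none => true | some o => o == p.1)
      c.1 c.2).mp (h p hp c hc) v hv
    exact (match_owner_iff ((pvOwner ardic).get? v) p.1).mp h3 o ho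
  · intro h p hp c hc
    refine (offs_forall_iff
      (fun w => match (pvOwner ardic).get? w with | none => true | some o => o == p.1)
      c.1 c.2).mpr ?_
    intro v hv
    exact (match_owner_iff ((pvOwner ardic).get? v) p.1).mpr (h p hp c hc v hv)

-- owner lookups
theorem pvOwner_inner_get (cells : List (Int × Int)) (k : String)
    (d : PySem.Dict (Int × Int) String) (v : Int × Int) (o : String)
    (h : (cells.foldl (fun d c => d.insert c k) d).get? v = some o) :
    d.get? v = some o ∨ (o = k ∧ v ∈ cells) := by
  induction cells generalizing d with
  | nil => exact Or.inl h
  | cons c rest ih =>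
    simp only [List.foldl_cons] at h
    rcases ih _ h with h' | ⟨rfl, hv⟩
    · rw [PySem.Dict.get?_insert] at h'
      split at h'
      · exact Or.inr ⟨(Option.some.inj h').symm ▸ rfl, by simp [*]⟩
      · exact Or.inl h'
    · exact Or.inr ⟨rfl, by simp [hv]⟩

theorem pvOwner_get (ardic : List (String × List (Int × Int))) (v : Int × Int) (o : String)
    (h : (pvOwner ardic).get? v = some o) : ∃ p ∈ ardic, p.1 = o ∧ v ∈ p.2 := by
  have main : ∀ (l : List (String × List (Int × Int))) (d : PySem.Dict (Int × Int) String),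
      (l.foldl (fun d p => p.2.foldl (fun d c => d.insert c p.1) d) d).get? v = some o →
      d.get? v = some o ∨ ∃ p ∈ l, p.1 = o ∧ v ∈ p.2 := by
    intro l
    induction l with
    | nil => exact fun d h => Or.inl h
    | cons a rest ih =>
      intro d h
      rcases ih _ h with h' | ⟨p, hp, hpo, hpv⟩
      · rcases pvOwner_inner_get a.2 a.1 d v o h' with h'' | ⟨rfl, hv⟩
        · exact Or.inl h''
        · exact Or.inr ⟨a, List.mem_cons_self, rfl, hv⟩
      · exact Or.inr ⟨p, List.mem_cons_of_mem _ hp, hpo, hpv⟩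
  rcases main ardic PySem.Dict.empty h with h' | hgood
  · simp [PySem.Dict.empty, PySem.Dict.get?] at h'
  · exact hgood

theorem pvOwner_isSome (ardic : List (String × List (Int × Int))) (p : String × List (Int × Int))
    (hp : p ∈ ardic) (v : Int × Int) (hv : v ∈ p.2) : ((pvOwner ardic).get? v).isSome := by
  have inner_pres : ∀ (cells : List (Int × Int)) (k : String) (d : PySem.Dict (Int × Int) String),
      (d.get? v).isSome → ((cells.foldl (fun d c => d.insert c k) d).get? v).isSome := by
    intro cells k
    induction cells with
    | nil => exact fun d h => h
    | cons c rest ih =>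
      intro d h
      refine ih _ ?_
      rw [PySem.Dict.get?_insert]
      split
      · simp
      · exact h
  have inner_some : ∀ (cells : List (Int × Int)) (k : String) (d : PySem.Dict (Int × Int) String),
      v ∈ cells → ((cells.foldl (fun d c => d.insert c k) d).get? v).isSome := by
    intro cells k
    induction cells with
    | nil => intro d h; cases h
    | cons c rest ih =>
      intro d hv'
      rcases List.mem_cons.mp hv' with rfl | hv'
      · refine inner_pres rest k _ ?_
        rw [PySem.Dict.get?_insert]
        simp
      · exact ih _ hv'
  have outer : ∀ (l : List (String × List (Int × Int))) (d : PySem.Dict (Int × Int) String),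
      (d.get? v).isSome ∨ (∃ q ∈ l, v ∈ q.2) →
      ((l.foldl (fun d p => p.2.foldl (fun d c => d.insert c p.1) d) d).get? v).isSome := by
    intro l
    induction l with
    | nil =>
      rintro d (h | ⟨q, hq, -⟩)
      · exact h
      · cases hq
    | cons a rest ih =>
      rintro d (h | ⟨q, hq, hqv⟩)
      · exact ih _ (Or.inl (inner_pres a.2 a.1 d h))
      · rcases List.mem_cons.mp hq with rfl | hq
        · exact ih _ (Or.inl (inner_some q.2 q.1 d hqv))
        · exact ih _ (Or.inr ⟨q, hq, hqv⟩)
  exact outer ardic PySem.Dict.empty (Or.inr ⟨p, hp, hv⟩)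

-- unique keys give unique cell lists
theorem key_unique {l : List (String × List (Int × Int))} (hnd : (l.map Prod.fst).Nodup)
    {k : String} {cs cs' : List (Int × Int)} (h1 : (k, cs) ∈ l) (h2 : (k, cs') ∈ l) : cs = cs' := by
  induction l with
  | nil => cases h1
  | cons a rest ih =>
    simp only [List.map_cons, List.nodup_cons] at hnd
    rcases List.mem_cons.mp h1 with e1 | m1 <;> rcases List.mem_cons.mp h2 with e2 | m2
    · rw [← e1] at e2; simp only [Prod.mk.injEq, true_and] at e2; exact e2.symm
    · subst e1; exact absurd (show (k, cs).1 ∈ List.map Prod.fst rest from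
        List.mem_map.mpr ⟨(k, cs'), m2, rfl⟩) hnd.1
    · subst e2; exact absurd (show (k, cs').1 ∈ List.map Prod.fst rest from
        List.mem_map.mpr ⟨(k, cs), m1, rfl⟩) hnd.1
    · exact ih hnd.2 m1 m2

-- ===== VERDICT (by name: the statement is the Claim_ definition above) =====
theorem bool_eq_iff (a b : Bool) : a = b ↔ ((a = true) ↔ (b = true)) := by
  cases a <;> cases b <;> simp

theorem adjacency_checker_spec : Claim_equal_adjacency_checker := by
  intro ardic _hdom hpre
  unfold Spec_adjacency_checker adjacency_checker
  rw [bool_eq_iff, pvLoopA_char, alt_true_iff]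
  have hsym : Symmetric (fun p q : String × List (Int × Int) => ¬ ShipAdj p q) :=
    fun a b hab hba => hab (ShipAdj_symm hba)
  constructor
  · intro h p hp c hc v hv o ho
    by_contra hok
    obtain ⟨q, hq, hqo, hqv⟩ := pvOwner_get ardic v o ho
    have hne : q ≠ p := fun e => hok (by rw [← e, hqo])
    exact (List.Pairwise.forall hsym h hq hp hne) ⟨v, hqv, c, hc, pvNbrs_symm c v hv⟩
  · intro cond
    rw [List.pairwise_iff_getElem]
    intro i j hi hj hij hadj
    obtain ⟨c, hc, v, hv, hn⟩ := hadj
    set a := ardic[i] with ha_def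
    set b := ardic[j] with hb_def
    have ha : a ∈ ardic := List.getElem_mem _
    have hb : b ∈ ardic := List.getElem_mem _
    have hkey : a.1 ≠ b.1 := by
      intro e
      have hm : i < (ardic.map Prod.fst).length := by simpa using hi
      have hm' : j < (ardic.map Prod.fst).length := by simpa using hj
      have : (ardic.map Prod.fst)[i] = (ardic.map Prod.fst)[j] := by
        simpa [List.getElem_map] using e
      exact absurd ((List.Nodup.getElem_inj_iff hpre).mp this) (Nat.ne_of_lt hij)
    -- owner of v
    obtain ⟨o, ho⟩ := Option.isSome_iff_exists.mp (pvOwner_isSome ardic b hb v hv)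
    have hoa : o = a.1 := cond a ha c hc v hn o ho
    obtain ⟨q, hq, hqo, hqv⟩ := pvOwner_get ardic v o ho
    have hqa : (a.1, q.2) ∈ ardic := by
      have : q = (a.1, q.2) := by rw [← hoa, ← hqo]
      rwa [← this]
    have haa : (a.1, a.2) ∈ ardic := by rwa [Prod.mk.eta]
    have hva : v ∈ a.2 := key_unique hpre hqa haa ▸ hqv
    -- owner of c
    obtain ⟨o', ho'⟩ := Option.isSome_iff_exists.mp (pvOwner_isSome ardic a ha c hc)
    have hob : o' = b.1 := cond b hb v hv c (pvNbrs_symm c v hn) o' ho'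
    have hoa' : o' = a.1 := cond a ha v hva c (pvNbrs_symm c v hn) o' ho'
    exact hkey (hoa' ▸ hob ▸ rfl)
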